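-- pv_equiv track=rewrite | github.com/Uplpw/Jihuang | JiHuang/agent/utils/obs_utils.py | _find_buff
-- ===== SOURCE A (Python) =====
-- def _find_buff(obs):
--     """
--     Get all buffs information
--     :param obs: Current observation
--     :return: dict of buffs information
--     """
--     if obs is None:
--         return []
--     buff_obs = obs[83:173].copy()
--     buffs = {1001: 0, 3001: 0}
--     for idx in range(int(len(buff_obs) / 9)):
--         if int(buff_obs[idx * 9]) == 1001:  # night vision
--             buffs[1001] += 1
--         if int(buff_obs[idx * 9]) == 3001:  # night vision
--             buffs[3001] += 1
--     return buffs
-- ===== SOURCE B (Python) =====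
-- def _find_buff(obs):
--     """
--     Get all buffs information
--     :param obs: Current observation
--     :return: dict of buffs information
--     """
--     if obs is None:
--         return []
--
--     def go(xs, c1, c3):
--         # consume the buff records chunk by chunk (9 slots each), recursively
--         if len(xs) < 9:
--             return {1001: c1, 3001: c3}
--         head = int(xs[0])
--         return go(xs[9:], c1 + (head == 1001), c3 + (head == 3001))
--
--     return go(obs[83:173], 0, 0)
-- ===== Notes on version B (the rewrite author's own statement) =====
-- stated objective: alternative
-- what changed: Replaces A's index-arithmetic loop (range over len//9, strided reads at idx*9 into a mutable dict) with a recursive consumer that peels one 9-slot chunk off the slice per call and threads the two counts as accumulator arguments.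
import Mathlib
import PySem

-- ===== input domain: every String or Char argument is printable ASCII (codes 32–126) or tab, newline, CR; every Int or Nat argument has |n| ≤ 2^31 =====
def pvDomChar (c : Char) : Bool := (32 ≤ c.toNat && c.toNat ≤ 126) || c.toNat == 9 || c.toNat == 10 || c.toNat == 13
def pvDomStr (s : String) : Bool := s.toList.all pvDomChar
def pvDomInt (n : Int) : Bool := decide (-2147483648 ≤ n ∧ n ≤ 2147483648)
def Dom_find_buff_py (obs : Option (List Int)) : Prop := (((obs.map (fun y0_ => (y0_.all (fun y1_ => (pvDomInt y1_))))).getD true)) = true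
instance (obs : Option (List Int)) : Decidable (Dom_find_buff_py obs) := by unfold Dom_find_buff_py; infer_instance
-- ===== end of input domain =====

-- B replaces A's index-arithmetic loop over a mutable dict with a recursive consumer
-- that peels one 9-slot chunk off the slice per call, threading the two counts as accumulators.

-- ===== PORT A =====
def find_buff_py (obs : Option (List Int)) : List (Int × Int) :=
  match obs with
  | none => []
  | some o =>
    let buff_obs := PySem.List.slice o (some 83) (some 173)
    let buffs : PySem.Dict Int Int := (PySem.Dict.empty.insert 1001 0).insert 3001 0
    let buffs := (PySem.List.pyRange 0 (buff_obs.length / 9 : Nat) 1).foldl (fun d idx =>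
      -- buff_obs[idx * 9] is always in range (idx < len // 9), so pyGetD is exact here
      let d := if PySem.List.pyGetD buff_obs (idx * 9) 0 == 1001 then d.modify 1001 0 (· + 1) else d
      if PySem.List.pyGetD buff_obs (idx * 9) 0 == 3001 then d.modify 3001 0 (· + 1) else d) buffs
    buffs.items

-- ===== PORT B =====
-- go(xs, c1, c3): recursive chunk consumer from Source B
def find_buff_go (xs : List Int) (c1 c3 : Int) : List (Int × Int) :=
  if _h : xs.length < 9 then [(1001, c1), (3001, c3)]
  else
    -- xs[0] is in range here (9 ≤ len xs), so pyGetD is exact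
    let head := PySem.List.pyGetD xs 0 0
    find_buff_go (PySem.List.slice xs (some 9) none)
      (c1 + if head = 1001 then 1 else 0) (c3 + if head = 3001 then 1 else 0)
termination_by xs.length
decreasing_by
  rw [show PySem.List.slice xs (some 9) none = xs.drop 9 from PySem.List.slice_from_natCast xs 9]
  simp only [List.length_drop]; omega

def find_buff_py_alt (obs : Option (List Int)) : List (Int × Int) :=
  match obs with
  | none => []
  | some o => find_buff_go (PySem.List.slice o (some 83) (some 173)) 0 0

-- ===== PRECONDITION & SPEC =====
def Spec_find_buff_py (obs : Option (List Int)) (out : List (Int × Int)) : Prop := out = find_buff_py_alt obs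
instance (obs : Option (List Int)) (out : List (Int × Int)) : Decidable (Spec_find_buff_py obs out) := by unfold Spec_find_buff_py; infer_instance

-- ===== CLAIM (what is proved, stated in full; the proofs are below) =====
def Claim_equal_find_buff_py : Prop := ∀ (obs : Option (List Int)), Dom_find_buff_py obs → Spec_find_buff_py obs (find_buff_py obs)

-- ===== LEMMAS AND PROOFS =====

-- The strided id list both programs conceptually read: element k*9 for k < len/9.
def pvIds (xs : List Int) : List Int := (List.range (xs.length / 9)).map (fun k => xs.getD (k * 9) 0)

lemma pvIds_nil (xs : List Int) (h : xs.length < 9) : pvIds xs = [] := by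
  unfold pvIds
  rw [Nat.div_eq_of_lt h]
  simp

lemma pvIds_cons (xs : List Int) (h : 9 ≤ xs.length) :
    pvIds xs = xs.getD 0 0 :: pvIds (xs.drop 9) := by
  unfold pvIds
  have hlen : (xs.drop 9).length = xs.length - 9 := by simp
  have hdiv : xs.length / 9 = (xs.length - 9) / 9 + 1 := by omega
  rw [hlen, hdiv, List.range_succ_eq_map, List.map_cons, List.map_map]
  congr 1
  apply List.map_congr_left
  intro k _
  simp only [Function.comp_apply]
  have : (k + 1) * 9 = 9 + k * 9 := by ring
  simp [List.getD_eq_getElem?_getD, List.getElem?_drop, this]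

-- A's mapped index reads over pyRange are exactly pvIds.
lemma map_pyRange_eq_pvIds (xs : List Int) :
    (PySem.List.pyRange 0 ((xs.length / 9 : Nat) : Int) 1).map (fun i => PySem.List.pyGetD xs (i * 9) 0)
      = pvIds xs := by
  rw [PySem.List.pyRange_zero_nat, List.map_map]
  unfold pvIds
  apply List.map_congr_left
  intro k _
  simp only [Function.comp_apply]
  have : ((k : Int) * 9) = ((k * 9 : Nat) : Int) := by push_cast; ring
  rw [this, PySem.List.pyGetD_natCast]

-- B's recursive consumer computes the two counts of pvIds.
lemma find_buff_go_eq (xs : List Int) (c1 c3 : Int) :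
    find_buff_go xs c1 c3
      = [(1001, c1 + ((pvIds xs).count 1001 : Int)), (3001, c3 + ((pvIds xs).count 3001 : Int))] := by
  fun_induction find_buff_go xs c1 c3 with
  | case1 xs c1 c3 h =>
    rw [pvIds_nil xs h]
    simp
  | case2 xs c1 c3 h head ih =>
    simp only [dite_eq_ite] at ih
    rw [ih, pvIds_cons xs (by omega)]
    rw [show PySem.List.slice xs (some 9) none = xs.drop 9 from PySem.List.slice_from_natCast xs 9]
    rw [show head = xs.getD 0 0 from PySem.List.pyGetD_zero xs 0]
    simp only [List.count_cons, List.cons.injEq, Prod.mk.injEq]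
    refine ⟨⟨trivial, ?_⟩, ⟨trivial, ?_⟩, trivial⟩ <;>
      (simp only [beq_iff_eq]; split_ifs <;> push_cast <;> ring)

-- A's loop invariant: the fold, started from the two-entry dict, adds the two counts.
lemma modify_1001 (a b : Int) : (PySem.Dict.mk [(1001, a), (3001, b)] : PySem.Dict Int Int).modify 1001 0 (· + 1) = PySem.Dict.mk [(1001, a + 1), (3001, b)] := by
  simp [PySem.Dict.modify, PySem.Dict.contains, PySem.Dict.getD, PySem.Dict.get?, PySem.Dict.insert]

lemma modify_3001 (a b : Int) : (PySem.Dict.mk [(1001, a), (3001, b)] : PySem.Dict Int Int).modify 3001 0 (· + 1) = PySem.Dict.mk [(1001, a), (3001, b + 1)] := by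
  simp [PySem.Dict.modify, PySem.Dict.contains, PySem.Dict.getD, PySem.Dict.get?, PySem.Dict.insert]

lemma loop_inv (g : Int → Int) (l : List Int) (a b : Int) :
    (l.foldl (fun d i =>
        if g i = 3001 then (if g i = 1001 then PySem.Dict.modify d 1001 0 (· + 1) else d).modify 3001 0 (· + 1)
        else if g i = 1001 then PySem.Dict.modify d 1001 0 (· + 1) else d)
      (PySem.Dict.mk [(1001, a), (3001, b)] : PySem.Dict Int Int))
    = PySem.Dict.mk [(1001, a + ((l.map g).count 1001 : Int)), (3001, b + ((l.map g).count 3001 : Int))] := by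
  induction l generalizing a b with
  | nil => simp
  | cons x xs ih =>
    simp only [List.foldl_cons, List.map_cons, List.count_cons]
    by_cases h1 : g x = 1001
    · have h3 : ¬ g x = 3001 := by omega
      rw [if_neg h3, if_pos h1, modify_1001, ih]
      simp [h1]
      ring
    · by_cases h3 : g x = 3001
      · rw [if_pos h3, if_neg h1, modify_3001, ih]
        simp [h3]
        ring
      · rw [if_neg h3, if_neg h1, ih]
        simp [h1, h3]

-- ===== VERDICT (by name: the statement is the Claim_ definition above) =====
theorem find_buff_py_spec : Claim_equal_find_buff_py := by
  intro obs _
  unfold Spec_find_buff_py find_buff_py find_buff_py_alt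
  cases obs with
  | none => rfl
  | some o =>
    simp only [beq_iff_eq]
    rw [show ((PySem.Dict.empty.insert 1001 0).insert 3001 0 : PySem.Dict Int Int)
          = PySem.Dict.mk [(1001, 0), (3001, 0)] from rfl]
    rw [loop_inv]
    rw [map_pyRange_eq_pvIds, find_buff_go_eq]
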